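-- pv_equiv track=rewrite | github.com/WorryingWonton/PyBats | map_2.py | firstSwap
-- ===== SOURCE A (Python) =====
-- def firstSwap(strings):
--     first_chars = [x[0] for x in strings]
--     unique = {x: first_chars.index(x) for x in first_chars}
--     for idx, sub in enumerate(strings):
--         if sub[0] in unique and (idx > unique[sub[0]] and sub[0] == strings[unique[sub[0]]][0]):
--             strings[idx], strings[unique[sub[0]]] = strings[unique[sub[0]]], sub
--             del unique[sub[0]]
--     return strings
-- ===== SOURCE B (Python) =====
-- def firstSwap(strings):
--     # Positional rebuild: compute each output slot from first/second-occurrence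
--     # indices of its initial character, instead of A's in-place swap loop with a
--     # shrinking first-index dict.  Mutates strings in place like A and returns it.
--     firsts = [s[0] for s in strings]
--     out = []
--     for k in range(len(strings)):
--         c = firsts[k]
--         f = firsts.index(c)
--         rest = firsts[f + 1:]
--         if c in rest:
--             j = f + 1 + rest.index(c)
--             if k == f:
--                 out.append(strings[j])
--             elif k == j:
--                 out.append(strings[f])
--             else:
--                 out.append(strings[k])
--         else:
--             out.append(strings[k])
--     strings[:] = out
--     return strings
-- ===== Notes on version B (the rewrite author's own statement) =====
-- stated objective: alternative
-- what changed: Replaces A's in-place conditional-swap loop over the mutating list with a shrinking first-index dict by a stateless positional rebuild that computes each output slot directly from the first- and second-occurrence indices of its initial character.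
import Mathlib
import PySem

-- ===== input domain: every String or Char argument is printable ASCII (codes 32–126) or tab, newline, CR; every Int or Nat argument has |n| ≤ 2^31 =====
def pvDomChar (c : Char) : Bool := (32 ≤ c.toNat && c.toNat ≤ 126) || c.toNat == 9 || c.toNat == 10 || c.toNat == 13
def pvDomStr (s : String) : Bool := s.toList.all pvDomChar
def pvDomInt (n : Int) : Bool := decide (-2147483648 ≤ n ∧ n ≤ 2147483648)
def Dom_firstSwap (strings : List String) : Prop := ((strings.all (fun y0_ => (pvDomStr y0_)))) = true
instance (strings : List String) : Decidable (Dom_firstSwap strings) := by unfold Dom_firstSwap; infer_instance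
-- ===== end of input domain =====

-- B rebuilds the output positionally from first/second-occurrence indices instead of A's
-- in-place swap loop with a shrinking first-index dict (objective: alternative).
-- Python A and B both mutate the argument list in place and return it; the equivalence
-- proved here is about the RETURN value only.

-- ===== PORT A =====

-- x[0] as a total function; exact on nonempty strings (guaranteed by Pre_).
def pvFc (x : String) : Char := (PySem.Str.pyGet? x 0).getD ' '

-- the body of A's for-loop (state = (strings, unique), both mutated in place)
def pvStepA (st : List String × PySem.Dict Char Nat) (idx : Nat) :
    List String × PySem.Dict Char Nat :=
  let cur := st.1
  let uq := st.2
  let sub := cur.getD idx ""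
  match uq.get? (pvFc sub) with
  | some u =>
      if u < idx ∧ pvFc sub = pvFc (cur.getD u "") then
        ((cur.set idx (cur.getD u "")).set u sub, uq.erase (pvFc sub))
      else (cur, uq)
  | none => (cur, uq)

def firstSwap (strings : List String) : List String :=
  -- first_chars = [x[0] for x in strings]
  let firstChars := strings.map pvFc
  -- unique = {x: first_chars.index(x) for x in first_chars}
  let unique : PySem.Dict Char Nat :=
    firstChars.foldl
      (fun d x => d.insert x ((PySem.List.index? firstChars x).getD 0)) PySem.Dict.empty
  -- for idx, sub in enumerate(strings): enumerate of the LIVE list mutated in place,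
  -- ported as an index loop reading the current list (exact: swaps only touch positions ≤ idx)
  let final := (List.range strings.length).foldl pvStepA (strings, unique)
  final.1

-- ===== PORT B =====

def firstSwap_alt (strings : List String) : List String :=
  -- firsts = [s[0] for s in strings]
  let firsts := strings.map pvFc
  -- for k in range(len(strings)): out.append(...)
  let out := (List.range strings.length).foldl
    (fun out k =>
      let c := firsts.getD k ' '
      let f := (PySem.List.index? firsts c).getD 0
      let rest := PySem.List.slice firsts (some ((f + 1 : Nat) : Int)) none
      if c ∈ rest then
        let j := f + 1 + (PySem.List.index? rest c).getD 0
        out ++ [if k = f then strings.getD j "" else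
                if k = j then strings.getD f "" else strings.getD k ""]
      else
        out ++ [strings.getD k ""]) []
  out

-- ===== PRECONDITION & SPEC =====

-- A (and B) evaluate x[0] on every element: any empty string raises IndexError.
def Pre_firstSwap (strings : List String) : Prop := ∀ x ∈ strings, x ≠ ""
instance (strings : List String) : Decidable (Pre_firstSwap strings) := by
  unfold Pre_firstSwap; infer_instance

def pvWitness_firstSwap : List String := ["apple", "bee", "ant", "cow", "bat"]

def Spec_firstSwap (strings : List String) (out : List String) : Prop := out = firstSwap_alt strings
instance (strings : List String) (out : List String) : Decidable (Spec_firstSwap strings out) := by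
  unfold Spec_firstSwap; infer_instance

-- ===== CLAIM (what is proved, stated in full; the proofs are below) =====
def Claim_equal_firstSwap : Prop := ∀ (strings : List String), Dom_firstSwap strings → Pre_firstSwap strings → Spec_firstSwap strings (firstSwap strings)

-- ===== LEMMAS AND PROOFS =====

-- proof-side abbreviations ------------------------------------------------

-- index of the first occurrence of c in fcs (meaningful when c ∈ fcs)
def pvIdx0 (fcs : List Char) (c : Char) : Nat := (PySem.List.index? fcs c).getD 0

-- index of the second occurrence of c in fcs, if any
def pvSecond (fcs : List Char) (c : Char) : Option Nat :=
  (PySem.List.index? (fcs.drop (pvIdx0 fcs c + 1)) c).map (fun i => pvIdx0 fcs c + 1 + i)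

-- where position k reads from, once A's loop has processed indices < m
def pvSigma (fcs : List Char) (m k : Nat) : Nat :=
  match pvSecond fcs (fcs.getD k ' ') with
  | some j =>
      if j < m then
        (if k = pvIdx0 fcs (fcs.getD k ' ') then j
         else if k = j then pvIdx0 fcs (fcs.getD k ' ') else k)
      else k
  | none => k

-- the list state after A's loop has processed indices < m
def pvCur (s : List String) (m : Nat) : List String :=
  (List.range s.length).map (fun k => s.getD (pvSigma (s.map pvFc) m k) "")

-- the dict state after A's loop has processed indices < m (as a lookup function)
def pvUq (fcs : List Char) (m : Nat) (c : Char) : Option Nat :=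
  if c ∈ fcs then
    match pvSecond fcs c with
    | some j => if j < m then none else some (pvIdx0 fcs c)
    | none => some (pvIdx0 fcs c)
  else none

-- the initial dict of A (the same term as in firstSwap)
def pvUq0 (s : List String) : PySem.Dict Char Nat :=
  (s.map pvFc).foldl
    (fun d x => d.insert x ((PySem.List.index? (s.map pvFc) x).getD 0)) PySem.Dict.empty

-- small helpers ------------------------------------------------------------

theorem pv_getD_eq {α : Type} (l : List α) (d : α) {k : Nat} (hk : k < l.length) :
    l.getD k d = l[k] := by
  simp [List.getD_eq_getElem?_getD, List.getElem?_eq_getElem hk]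

-- Dict lemmas ---------------------------------------------------------------

theorem pv_find?_filter_ne {κ ν : Type} [BEq κ] [LawfulBEq κ] (l : List (κ × ν)) (k k' : κ)
    (h : ¬ k' = k) :
    (l.filter (fun p => !p.1 == k)).find? (fun p => p.1 == k') = l.find? (fun p => p.1 == k') := by
  induction l with
  | nil => rfl
  | cons hd tl ih =>
    by_cases h1 : hd.1 = k
    · rw [List.filter_cons_of_neg (by simp [h1]), ih,
        List.find?_cons_of_neg (by simp [h1]; exact fun hh => h hh.symm)]
    · by_cases h2 : hd.1 = k'
      · rw [List.filter_cons_of_pos (by simp [h1]), List.find?_cons_of_pos (by simp [h2]),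
          List.find?_cons_of_pos (by simp [h2])]
      · rw [List.filter_cons_of_pos (by simp [h1]), List.find?_cons_of_neg (by simp [h2]),
          List.find?_cons_of_neg (by simp [h2]), ih]

theorem pv_get?_erase {κ ν : Type} [BEq κ] [LawfulBEq κ] [DecidableEq κ]
    (d : PySem.Dict κ ν) (k k' : κ) :
    (d.erase k).get? k' = if k' = k then none else d.get? k' := by
  obtain ⟨l⟩ := d
  simp only [PySem.Dict.erase, PySem.Dict.get?]
  by_cases hk : k' = k
  · subst hk
    rw [if_pos rfl, List.find?_eq_none.mpr, Option.map_none]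
    intro a ha
    have := List.of_mem_filter ha
    simpa using this
  · rw [if_neg hk, pv_find?_filter_ne l k k' hk]

theorem pv_get?_foldl_insert {κ ν : Type} [BEq κ] [LawfulBEq κ] [DecidableEq κ]
    (l : List κ) (g : κ → ν) (d0 : PySem.Dict κ ν) (c : κ) :
    (l.foldl (fun d x => d.insert x (g x)) d0).get? c
      = if c ∈ l then some (g c) else d0.get? c := by
  induction l generalizing d0 with
  | nil => simp
  | cons hd tl ih =>
    simp only [List.foldl_cons, ih, List.mem_cons]
    by_cases h1 : c ∈ tl
    · simp [h1]
    · by_cases h2 : c = hd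
      · simp [h2]
      · rw [PySem.Dict.get?_insert, if_neg h2]
        simp [h1, h2]

-- index? facts --------------------------------------------------------------

theorem pvIdx0_spec {fcs : List Char} {c : Char} (hc : c ∈ fcs) :
    ∃ hf : pvIdx0 fcs c < fcs.length,
      fcs[pvIdx0 fcs c] = c ∧ ∀ l (hl : l < pvIdx0 fcs c), fcs[l] ≠ c := by
  have hs : (PySem.List.index? fcs c).isSome := (PySem.List.index?_isSome_iff fcs c).mpr hc
  obtain ⟨f, hf⟩ := Option.isSome_iff_exists.mp hs
  have hgd : pvIdx0 fcs c = f := by simp only [pvIdx0, hf, Option.getD_some]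
  have hf' : PySem.List.index? fcs c = some (pvIdx0 fcs c) := by rw [hgd]; exact hf
  obtain ⟨hlt, heq, hmin⟩ := PySem.List.getElem_of_index?_eq_some hf'
  exact ⟨hlt, heq, fun l hl => hmin l hl⟩

theorem pvSecond_none {fcs : List Char} {c : Char} (h : pvSecond fcs c = none)
    {l : Nat} (hl : l < fcs.length) (hgt : pvIdx0 fcs c < l) : fcs[l] ≠ c := by
  have h' : PySem.List.index? (fcs.drop (pvIdx0 fcs c + 1)) c = none := by
    simpa [pvSecond] using h
  have hnm : c ∉ fcs.drop (pvIdx0 fcs c + 1) :=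
    (PySem.List.index?_eq_none_iff _ _).mp h'
  intro hc
  apply hnm
  have hidx : pvIdx0 fcs c + 1 + (l - (pvIdx0 fcs c + 1)) = l := by omega
  have hq : (fcs.drop (pvIdx0 fcs c + 1))[l - (pvIdx0 fcs c + 1)]? = some c := by
    rw [List.getElem?_drop, hidx, List.getElem?_eq_getElem hl, hc]
  exact List.mem_of_getElem? hq

theorem pvSecond_some {fcs : List Char} {c : Char} {j : Nat} (h : pvSecond fcs c = some j) :
    pvIdx0 fcs c < j ∧ ∃ hj : j < fcs.length, fcs[j] = c ∧
      ∀ l (hl : l < fcs.length), pvIdx0 fcs c < l → l < j → fcs[l] ≠ c := by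
  obtain ⟨i, hi, hj⟩ := Option.map_eq_some_iff.mp h
  obtain ⟨hlt', heq, hmin⟩ := PySem.List.getElem_of_index?_eq_some hi
  have hlt : i < fcs.length - (pvIdx0 fcs c + 1) := by
    have := hlt'; rwa [List.length_drop] at this
  subst hj
  have hq : fcs[pvIdx0 fcs c + 1 + i]? = some c := by
    rw [← List.getElem?_drop, List.getElem?_eq_getElem hlt', heq]
  obtain ⟨hj2, hv⟩ := List.getElem?_eq_some_iff.mp hq
  refine ⟨by omega, by omega, ?_, ?_⟩
  · exact hv
  · intro l hl hgt hlt2 hc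
    have h1 : l - (pvIdx0 fcs c + 1) < i := by omega
    apply hmin _ h1
    have hidx : pvIdx0 fcs c + 1 + (l - (pvIdx0 fcs c + 1)) = l := by omega
    have hq2 : (fcs.drop (pvIdx0 fcs c + 1))[l - (pvIdx0 fcs c + 1)]? = some c := by
      rw [List.getElem?_drop, hidx, List.getElem?_eq_getElem hl, hc]
    obtain ⟨_, hv2⟩ := List.getElem?_eq_some_iff.mp hq2
    exact hv2

-- sigma / cur / uq facts ----------------------------------------------------

theorem pvSigma_eq_of_some {fcs : List Char} {k j : Nat}
    (hs : pvSecond fcs (fcs.getD k ' ') = some j) (m : Nat) :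
    pvSigma fcs m k =
      if j < m then
        (if k = pvIdx0 fcs (fcs.getD k ' ') then j
         else if k = j then pvIdx0 fcs (fcs.getD k ' ') else k)
      else k := by
  simp only [pvSigma, hs]

theorem pvSigma_eq_of_none {fcs : List Char} {k : Nat}
    (hs : pvSecond fcs (fcs.getD k ' ') = none) (m : Nat) :
    pvSigma fcs m k = k := by
  simp only [pvSigma, hs]

theorem pvSigma_id_ge (fcs : List Char) {m k : Nat} (h : m ≤ k) : pvSigma fcs m k = k := by
  cases hs : pvSecond fcs (fcs.getD k ' ') with
  | none => rw [pvSigma_eq_of_none hs]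
  | some j =>
    obtain ⟨hfj, hj, _, _⟩ := pvSecond_some hs
    rw [pvSigma_eq_of_some hs]
    by_cases hjm : j < m
    · rw [if_pos hjm, if_neg (by omega), if_neg (by omega)]
    · rw [if_neg hjm]

theorem pvSigma_succ (fcs : List Char) (m k : Nat)
    (h : pvSecond fcs (fcs.getD k ' ') = some m →
         k ≠ pvIdx0 fcs (fcs.getD k ' ') ∧ k ≠ m) :
    pvSigma fcs (m + 1) k = pvSigma fcs m k := by
  cases hs : pvSecond fcs (fcs.getD k ' ') with
  | none => rw [pvSigma_eq_of_none hs, pvSigma_eq_of_none hs]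
  | some j =>
    rw [pvSigma_eq_of_some hs, pvSigma_eq_of_some hs]
    by_cases hjm : j < m
    · rw [if_pos hjm, if_pos (by omega)]
    · by_cases hje : j = m
      · subst hje
        obtain ⟨h1, h2⟩ := h hs
        rw [if_pos (by omega), if_neg h1, if_neg h2, if_neg hjm]
      · rw [if_neg (by omega), if_neg hjm]

theorem pvCur_getD (s : List String) (m : Nat) {k : Nat} (hk : k < s.length) :
    (pvCur s m).getD k "" = s.getD (pvSigma (s.map pvFc) m k) "" := by
  simp [pvCur, List.getD_eq_getElem?_getD, hk]

theorem pvCur_getElem (s : List String) (m : Nat) {k : Nat} (hk : k < (pvCur s m).length) :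
    (pvCur s m)[k] = s.getD (pvSigma (s.map pvFc) m k) "" := by
  simp [pvCur]

theorem pvCur_zero (s : List String) : pvCur s 0 = s := by
  apply List.ext_getElem
  · simp [pvCur]
  · intro k h1 h2
    rw [pvCur_getElem s 0 h1, pvSigma_id_ge _ (Nat.zero_le k), pv_getD_eq s "" h2]

theorem pvFc_getD (s : List String) {k : Nat} (hk : k < s.length) :
    pvFc (s.getD k "") = (s.map pvFc).getD k ' ' := by
  rw [pv_getD_eq s "" hk, pv_getD_eq (s.map pvFc) ' ' (by simpa using hk), List.getElem_map]

theorem pvUq_eq_of_some {fcs : List Char} {c : Char} {j : Nat} (hc : c ∈ fcs)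
    (hs : pvSecond fcs c = some j) (m : Nat) :
    pvUq fcs m c = if j < m then none else some (pvIdx0 fcs c) := by
  simp only [pvUq, if_pos hc, hs]

theorem pvUq_eq_of_none {fcs : List Char} {c : Char} (hc : c ∈ fcs)
    (hs : pvSecond fcs c = none) (m : Nat) :
    pvUq fcs m c = some (pvIdx0 fcs c) := by
  simp only [pvUq, if_pos hc, hs]

theorem pvUq_eq_of_not_mem {fcs : List Char} {c : Char} (hc : c ∉ fcs) (m : Nat) :
    pvUq fcs m c = none := by
  simp only [pvUq, if_neg hc]

theorem pvUq_succ (fcs : List Char) (m : Nat) (c' : Char)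
    (h : pvSecond fcs c' ≠ some m) : pvUq fcs (m + 1) c' = pvUq fcs m c' := by
  by_cases hm : c' ∈ fcs
  · cases hs : pvSecond fcs c' with
    | none => rw [pvUq_eq_of_none hm hs, pvUq_eq_of_none hm hs]
    | some j =>
      have hne : j ≠ m := fun e => h (e ▸ hs)
      rw [pvUq_eq_of_some hm hs, pvUq_eq_of_some hm hs]
      by_cases hj : j < m
      · rw [if_pos hj, if_pos (by omega)]
      · rw [if_neg hj, if_neg (by omega)]
  · rw [pvUq_eq_of_not_mem hm, pvUq_eq_of_not_mem hm]

theorem pvCur_succ_id (s : List String) (m : Nat)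
    (h : ∀ c', pvSecond (s.map pvFc) c' ≠ some m) : pvCur s (m + 1) = pvCur s m := by
  unfold pvCur
  apply List.map_congr_left
  intro k _
  rw [pvSigma_succ (s.map pvFc) m k (fun he => absurd he (h _))]

-- the swap step: positions (first, m) of the current list are exchanged
theorem pvCur_succ_swap (s : List String) (m : Nat) (hmn : m < s.length)
    (hs : pvSecond (s.map pvFc) ((s.map pvFc).getD m ' ') = some m) :
    ((pvCur s m).set m
        (s.getD (pvIdx0 (s.map pvFc) ((s.map pvFc).getD m ' ')) "")).set
      (pvIdx0 (s.map pvFc) ((s.map pvFc).getD m ' ')) (s.getD m "")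
    = pvCur s (m + 1) := by
  obtain ⟨hfj, hjn, hjv, hjmin⟩ := pvSecond_some hs
  have hml : m < (s.map pvFc).length := by simpa using hmn
  have hmval : (s.map pvFc).getD m ' ' = (s.map pvFc)[m] := pv_getD_eq _ ' ' hml
  obtain ⟨hfn, hfv, hfmin⟩ := pvIdx0_spec (by rw [hmval]; exact List.getElem_mem hml :
    (s.map pvFc).getD m ' ' ∈ s.map pvFc)
  have hgf : (s.map pvFc).getD (pvIdx0 (s.map pvFc) ((s.map pvFc).getD m ' ')) ' '
      = (s.map pvFc).getD m ' ' := by rw [pv_getD_eq _ ' ' hfn, hfv]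
  apply List.ext_getElem
  · simp [pvCur]
  · intro k h1 h2
    have hk : k < s.length := by simpa [pvCur] using h2
    rw [List.getElem_set, List.getElem_set, pvCur_getElem s (m+1) h2]
    by_cases hkf : pvIdx0 (s.map pvFc) ((s.map pvFc).getD m ' ') = k
    · rw [if_pos hkf, ← hkf]
      rw [pvSigma_eq_of_some (by rw [hgf]; exact hs) (m+1), hgf, if_pos (by omega), if_pos rfl]
    · rw [if_neg hkf]
      by_cases hkm : m = k
      · rw [if_pos hkm, ← hkm]
        rw [pvSigma_eq_of_some hs (m+1), if_pos (by omega), if_neg (by omega), if_pos rfl]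
      · rw [if_neg hkm, pvCur_getElem s m (by simpa [pvCur] using hk)]
        rw [pvSigma_succ (s.map pvFc) m k ?_]
        intro he
        obtain ⟨_, hj2, hv2, _⟩ := pvSecond_some he
        have hck : (s.map pvFc).getD k ' ' = (s.map pvFc).getD m ' ' := by
          rw [hmval, ← hv2]
        constructor
        · rw [hck]; exact fun e => hkf e.symm
        · exact fun e => hkm e.symm

-- step characterizations of A's loop body ----------------------------------

theorem pvStepA_eq_none (st : List String × PySem.Dict Char Nat) (idx : Nat)
    (h : st.2.get? (pvFc (st.1.getD idx "")) = none) : pvStepA st idx = st := by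
  simp only [pvStepA, h]

theorem pvStepA_eq_some (st : List String × PySem.Dict Char Nat) (idx u : Nat)
    (h : st.2.get? (pvFc (st.1.getD idx "")) = some u) :
    pvStepA st idx =
      if u < idx ∧ pvFc (st.1.getD idx "") = pvFc (st.1.getD u "") then
        ((st.1.set idx (st.1.getD u "")).set u (st.1.getD idx ""),
         st.2.erase (pvFc (st.1.getD idx "")))
      else st := by
  simp only [pvStepA, h]

-- the loop invariant --------------------------------------------------------

theorem pv_loop_inv (s : List String) (m : Nat) (hm : m ≤ s.length) :
    ((List.range m).foldl pvStepA (s, pvUq0 s)).1 = pvCur s m ∧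
    ∀ c, ((List.range m).foldl pvStepA (s, pvUq0 s)).2.get? c = pvUq (s.map pvFc) m c := by
  induction m with
  | zero =>
    refine ⟨by simp [pvCur_zero], ?_⟩
    intro c
    simp only [List.range_zero, List.foldl_nil]
    show (pvUq0 s).get? c = _
    rw [pvUq0, pv_get?_foldl_insert]
    by_cases hc : c ∈ s.map pvFc
    · rw [if_pos hc]
      cases hs : pvSecond (s.map pvFc) c with
      | none => rw [pvUq_eq_of_none hc hs]; rfl
      | some j => rw [pvUq_eq_of_some hc hs, if_neg (by omega)]; rfl
    · rw [if_neg hc, pvUq_eq_of_not_mem hc]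
      simp [PySem.Dict.get?, PySem.Dict.empty]
  | succ m ih =>
    have hmn : m < s.length := by omega
    obtain ⟨h1, h2⟩ := ih (by omega)
    rw [List.range_succ, List.foldl_append, List.foldl_cons, List.foldl_nil]
    have hsub : ((List.range m).foldl pvStepA (s, pvUq0 s)).1.getD m "" = s.getD m "" := by
      rw [h1, pvCur_getD s m hmn, pvSigma_id_ge _ (le_refl m)]
    have hcfc : pvFc (((List.range m).foldl pvStepA (s, pvUq0 s)).1.getD m "")
        = (s.map pvFc).getD m ' ' := by rw [hsub]; exact pvFc_getD s hmn
    have hmL : m < (s.map pvFc).length := by simpa using hmn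
    have hmval : (s.map pvFc).getD m ' ' = (s.map pvFc)[m] := pv_getD_eq _ ' ' hmL
    have hc : (s.map pvFc).getD m ' ' ∈ s.map pvFc := by
      rw [hmval]; exact List.getElem_mem hmL
    obtain ⟨hfn, hfv, hfmin⟩ := pvIdx0_spec hc
    have hfm : pvIdx0 (s.map pvFc) ((s.map pvFc).getD m ' ') ≤ m := by
      by_contra hlt
      exact hfmin m (by omega) hmval.symm
    have key : ∀ c', pvSecond (s.map pvFc) c' = some m → c' = (s.map pvFc).getD m ' ' := by
      intro c' he
      obtain ⟨_, hj, hv, _⟩ := pvSecond_some he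
      rw [← hv, hmval]
    have hscr : ((List.range m).foldl pvStepA (s, pvUq0 s)).2.get?
        (pvFc (((List.range m).foldl pvStepA (s, pvUq0 s)).1.getD m ""))
        = pvUq (s.map pvFc) m ((s.map pvFc).getD m ' ') := by rw [hcfc, h2]
    cases hs : pvSecond (s.map pvFc) ((s.map pvFc).getD m ' ') with
    | none =>
      have hfm' : pvIdx0 (s.map pvFc) ((s.map pvFc).getD m ' ') = m := by
        rcases Nat.lt_or_ge (pvIdx0 (s.map pvFc) ((s.map pvFc).getD m ' ')) m with h | h
        · exact absurd hmval.symm (pvSecond_none hs hmL h)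
        · omega
      rw [pvStepA_eq_some _ m _ (by rw [hscr, pvUq_eq_of_none hc hs])]
      rw [if_neg (by rw [hfm']; exact fun hcon => absurd hcon.1 (lt_irrefl m))]
      have hnomatch : ∀ c', pvSecond (s.map pvFc) c' ≠ some m := by
        intro c' he
        rw [key c' he] at he
        rw [hs] at he
        simp at he
      exact ⟨by rw [h1, ← pvCur_succ_id s m hnomatch],
             fun c' => by rw [h2, pvUq_succ _ m c' (hnomatch c')]⟩
    | some j =>
      obtain ⟨hfj, hjn, hjv, hjmin⟩ := pvSecond_some hs
      by_cases hjm : j < m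
      · rw [pvStepA_eq_none _ m (by rw [hscr, pvUq_eq_of_some hc hs, if_pos hjm])]
        have hnomatch : ∀ c', pvSecond (s.map pvFc) c' ≠ some m := by
          intro c' he
          rw [key c' he] at he
          rw [hs] at he
          injection he with h'
          omega
        exact ⟨by rw [h1, ← pvCur_succ_id s m hnomatch],
               fun c' => by rw [h2, pvUq_succ _ m c' (hnomatch c')]⟩
      · rw [pvStepA_eq_some _ m _ (by rw [hscr, pvUq_eq_of_some hc hs, if_neg hjm])]
        have hgf : (s.map pvFc).getD (pvIdx0 (s.map pvFc) ((s.map pvFc).getD m ' ')) ' '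
            = (s.map pvFc).getD m ' ' := by rw [pv_getD_eq _ ' ' hfn, hfv]
        have hsigf : pvSigma (s.map pvFc) m (pvIdx0 (s.map pvFc) ((s.map pvFc).getD m ' '))
            = pvIdx0 (s.map pvFc) ((s.map pvFc).getD m ' ') := by
          rw [pvSigma_eq_of_some (by rw [hgf]; exact hs) m, if_neg hjm]
        have hcurf : ((List.range m).foldl pvStepA (s, pvUq0 s)).1.getD
            (pvIdx0 (s.map pvFc) ((s.map pvFc).getD m ' ')) ""
            = s.getD (pvIdx0 (s.map pvFc) ((s.map pvFc).getD m ' ')) "" := by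
          rw [h1, pvCur_getD s m (by omega : pvIdx0 (s.map pvFc) ((s.map pvFc).getD m ' ') < s.length), hsigf]
        have hfcf : pvFc (((List.range m).foldl pvStepA (s, pvUq0 s)).1.getD
            (pvIdx0 (s.map pvFc) ((s.map pvFc).getD m ' ')) "")
            = (s.map pvFc).getD m ' ' := by
          rw [hcurf, pvFc_getD s (by omega : pvIdx0 (s.map pvFc) ((s.map pvFc).getD m ' ') < s.length), hgf]
        by_cases hfm2 : pvIdx0 (s.map pvFc) ((s.map pvFc).getD m ' ') < m
        · have hjm2 : j = m := by
            rcases Nat.lt_or_ge m j with hlt | hge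
            · exact absurd hmval.symm (hjmin m hmL (by omega) hlt)
            · omega
          rw [if_pos ⟨hfm2, by rw [hcfc, hfcf]⟩]
          constructor
          · show _ = pvCur s (m + 1)
            rw [hsub, hcurf, h1]
            exact pvCur_succ_swap s m hmn (hjm2 ▸ hs)
          · intro c'
            show (((List.range m).foldl pvStepA (s, pvUq0 s)).2.erase
                (pvFc (((List.range m).foldl pvStepA (s, pvUq0 s)).1.getD m ""))).get? c' = _
            rw [hcfc, pv_get?_erase]
            by_cases hcc : c' = (s.map pvFc).getD m ' '
            · rw [if_pos hcc, hcc, pvUq_eq_of_some hc (hjm2 ▸ hs) (m+1), if_pos (by omega)]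
            · rw [if_neg hcc, h2, pvUq_succ _ m c' (fun he => hcc (key c' he))]
        · have hfm3 : pvIdx0 (s.map pvFc) ((s.map pvFc).getD m ' ') = m := by omega
          rw [if_neg (fun hcon => absurd hcon.1 (by omega))]
          have hnomatch : ∀ c', pvSecond (s.map pvFc) c' ≠ some m := by
            intro c' he
            rw [key c' he] at he
            rw [hs] at he
            injection he with h'
            omega
          exact ⟨by rw [h1, ← pvCur_succ_id s m hnomatch],
                 fun c' => by rw [h2, pvUq_succ _ m c' (hnomatch c')]⟩

-- the two ports -------------------------------------------------------------

theorem pv_firstSwap_eq (s : List String) : firstSwap s = pvCur s s.length := by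
  show ((List.range s.length).foldl pvStepA (s, pvUq0 s)).1 = pvCur s s.length
  exact (pv_loop_inv s s.length le_rfl).1

theorem pv_firstSwap_alt_eq (s : List String) : firstSwap_alt s = pvCur s s.length := by
  show (List.range s.length).foldl _ [] = pvCur s s.length
  have hbody : (fun (out : List String) (k : Nat) =>
      let c := (s.map pvFc).getD k ' '
      let f := (PySem.List.index? (s.map pvFc) c).getD 0
      let rest := PySem.List.slice (s.map pvFc) (some ((f + 1 : Nat) : Int)) none
      if c ∈ rest then
        let j := f + 1 + (PySem.List.index? rest c).getD 0
        out ++ [if k = f then s.getD j "" else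
                if k = j then s.getD f "" else s.getD k ""]
      else
        out ++ [s.getD k ""])
      = (fun (out : List String) (k : Nat) =>
      out ++ [let c := (s.map pvFc).getD k ' '
              let f := (PySem.List.index? (s.map pvFc) c).getD 0
              let rest := PySem.List.slice (s.map pvFc) (some ((f + 1 : Nat) : Int)) none
              if c ∈ rest then
                let j := f + 1 + (PySem.List.index? rest c).getD 0
                if k = f then s.getD j "" else
                if k = j then s.getD f "" else s.getD k ""
              else s.getD k ""]) := by
    funext out k
    by_cases h : (s.map pvFc).getD k ' ' ∈
        PySem.List.slice (s.map pvFc)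
          (some (((PySem.List.index? (s.map pvFc) ((s.map pvFc).getD k ' ')).getD 0 + 1 : Nat) : Int)) none
    · simp only [if_pos h]
    · simp only [if_neg h]
  rw [hbody, PySem.List.foldl_append_singleton_eq_map, List.nil_append]
  unfold pvCur
  apply List.map_congr_left
  intro k hk
  have hkn : k < s.length := List.mem_range.mp hk
  simp only [PySem.List.slice_from_natCast]
  cases hr : PySem.List.index?
      ((s.map pvFc).drop ((PySem.List.index? (s.map pvFc) ((s.map pvFc).getD k ' ')).getD 0 + 1))
      ((s.map pvFc).getD k ' ') with
  | none =>
    have hnm : (s.map pvFc).getD k ' ' ∉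
        (s.map pvFc).drop ((PySem.List.index? (s.map pvFc) ((s.map pvFc).getD k ' ')).getD 0 + 1) :=
      (PySem.List.index?_eq_none_iff _ _).mp hr
    rw [if_neg hnm]
    have hsn : pvSecond (s.map pvFc) ((s.map pvFc).getD k ' ') = none := by
      simp only [pvSecond, pvIdx0, hr, Option.map_none]
    rw [pvSigma_eq_of_none hsn]
  | some i =>
    have hmem : (s.map pvFc).getD k ' ' ∈
        (s.map pvFc).drop ((PySem.List.index? (s.map pvFc) ((s.map pvFc).getD k ' ')).getD 0 + 1) := by
      have : (PySem.List.index?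
          ((s.map pvFc).drop ((PySem.List.index? (s.map pvFc) ((s.map pvFc).getD k ' ')).getD 0 + 1))
          ((s.map pvFc).getD k ' ')).isSome := by rw [hr]; rfl
      exact (PySem.List.index?_isSome_iff _ _).mp this
    rw [if_pos hmem]
    have hss : pvSecond (s.map pvFc) ((s.map pvFc).getD k ' ')
        = some ((PySem.List.index? (s.map pvFc) ((s.map pvFc).getD k ' ')).getD 0 + 1 + i) := by
      simp only [pvSecond, pvIdx0, hr, Option.map_some]
    obtain ⟨hfj, hjn, hjv, hjmin⟩ := pvSecond_some hss
    rw [pvSigma_eq_of_some hss]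
    have hjs : (PySem.List.index? (List.map pvFc s) ((List.map pvFc s).getD k ' ')).getD 0 + 1 + i
        < s.length := by simpa using hjn
    rw [if_pos hjs]
    simp only [pvIdx0, Option.getD_some]
    split_ifs <;> rfl

-- ===== VERDICT (by name: the statement is the Claim_ definition above) =====
theorem firstSwap_spec : Claim_equal_firstSwap := by
  intro s _ _
  unfold Spec_firstSwap
  rw [pv_firstSwap_eq, pv_firstSwap_alt_eq]
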